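-- pv_equiv track=rewrite | github.com/Integritylanddevelopment/GrandPrixSocial | memory/enhanced_memory_agents.py | build_concept_map
-- ===== SOURCE A (Python) =====
-- from typing import Dict, List, Optional, Tuple
--
-- def build_concept_map(concepts: List[str]) -> Dict:
--     """Build relationships between concepts"""
--     concept_map = {}
--     for concept in concepts:
--         related = [c for c in concepts if c != concept and (
--             c.lower() in concept.lower() or concept.lower() in c.lower()
--         )]
--         concept_map[concept] = related
--     return concept_map
-- ===== SOURCE B (Python) =====
-- def build_concept_map(concepts):
--     """Build relationships between concepts: staged passes over lowercase classes.
--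
--     Pass 1 computes ONE inclusive related-list per distinct lowercase class
--     (the substring relation only sees lowercase values); pass 2 derives each
--     distinct concept's list by stripping the concept itself out of its class
--     list. Duplicate keys thus never recompute anything."""
--     incl = {}
--     for low in dict.fromkeys(c.lower() for c in concepts):
--         incl[low] = [c for c in concepts if c.lower() in low or low in c.lower()]
--     concept_map = {}
--     for concept in dict.fromkeys(concepts):
--         concept_map[concept] = [x for x in incl[concept.lower()] if x != concept]
--     return concept_map
-- ===== Notes on version B (the rewrite author's own statement) =====
-- stated objective: faster
-- what changed: B works in two staged passes over deduplicated keys: it first computes one inclusive related-list per distinct lowercase equivalence class (the substring relation only depends on lowercase values), then derives each distinct concept's list by stripping the concept itself out of its class list, so duplicate and case-variant keys never recompute anything, unlike A's per-concept rescan of the whole list with lower() recomputed per test.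
import Mathlib
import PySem

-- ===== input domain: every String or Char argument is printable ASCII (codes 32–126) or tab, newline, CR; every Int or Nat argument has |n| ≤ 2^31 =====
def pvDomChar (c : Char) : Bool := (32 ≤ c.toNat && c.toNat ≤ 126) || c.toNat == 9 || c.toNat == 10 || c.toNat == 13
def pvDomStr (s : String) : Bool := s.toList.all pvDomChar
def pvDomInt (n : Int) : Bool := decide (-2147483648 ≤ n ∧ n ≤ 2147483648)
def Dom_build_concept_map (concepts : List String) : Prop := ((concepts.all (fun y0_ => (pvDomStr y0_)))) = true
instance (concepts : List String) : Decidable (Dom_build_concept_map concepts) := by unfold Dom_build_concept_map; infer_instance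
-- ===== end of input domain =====

-- B replaces A's per-concept rescan with the full predicate by two staged passes over
-- deduplicated keys: one inclusive related-list per distinct lowercase class, then a
-- removal pass stripping each distinct concept out of its class list.

-- ===== PORT A =====
def build_concept_map (concepts : List String) : List (String × List String) :=
  (concepts.foldl (fun m concept =>
      PySem.Dict.insert m concept
        (concepts.filter (fun c =>
          c ≠ concept &&
            (PySem.Str.isIn (PySem.Str.lower c) (PySem.Str.lower concept) ||
             PySem.Str.isIn (PySem.Str.lower concept) (PySem.Str.lower c)))))
    PySem.Dict.empty).items

-- ===== PORT B =====
-- pass 1: one inclusive related-list per distinct lowercase class (dict.fromkeys = PySem.List.dedup)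
def bcmIncl (concepts : List String) : PySem.Dict String (List String) :=
  (PySem.List.dedup (concepts.map PySem.Str.lower)).foldl
    (fun incl low => PySem.Dict.insert incl low
      (concepts.filter (fun c =>
        PySem.Str.isIn (PySem.Str.lower c) low || PySem.Str.isIn low (PySem.Str.lower c))))
    PySem.Dict.empty

-- pass 2: each distinct concept's list is its class list minus the concept itself
def build_concept_map_alt (concepts : List String) : List (String × List String) :=
  ((PySem.List.dedup concepts).foldl
    (fun m concept => PySem.Dict.insert m concept
      (((bcmIncl concepts).getD (PySem.Str.lower concept) []).filter (fun x => x ≠ concept)))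
    PySem.Dict.empty).items

-- ===== PRECONDITION & SPEC =====
def Spec_build_concept_map (concepts : List String) (out : List (String × List String)) : Prop := out = build_concept_map_alt concepts
instance (concepts : List String) (out : List (String × List String)) : Decidable (Spec_build_concept_map concepts out) := by unfold Spec_build_concept_map; infer_instance

-- ===== CLAIM (what is proved, stated in full; the proofs are below) =====
def Claim_equal_build_concept_map : Prop := ∀ (concepts : List String), Dom_build_concept_map concepts → Spec_build_concept_map concepts (build_concept_map concepts)

-- ===== LEMMAS AND PROOFS =====

-- getD of a fold of inserts whose value is a function of the key
theorem bcm_getD_foldl_insert {ν : Type} (f : String → ν) (dflt : ν) :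
    ∀ (l : List String) (d : PySem.Dict String ν) (k : String),
      (l.foldl (fun d k => d.insert k (f k)) d).getD k dflt =
        if k ∈ l then f k else d.getD k dflt := by
  intro l
  induction l with
  | nil => intro d k; simp
  | cons a l ih =>
      intro d k
      rw [List.foldl_cons, ih]
      by_cases hl : k ∈ l
      · simp [hl]
      · rw [PySem.Dict.getD_insert]
        by_cases hk : k = a <;> simp [hl, hk]

-- items of such a fold from the empty dict: one pair per first occurrence
theorem bcm_items_foldl_insert {ν : Type} (f : String → ν) (dflt : ν) (l : List String) :
    (l.foldl (fun d k => d.insert k (f k)) PySem.Dict.empty).items =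
      (PySem.List.dedup l).map (fun k => (k, f k)) := by
  set d := l.foldl (fun d k => d.insert k (f k)) PySem.Dict.empty with hd
  have hkeys : d.keys = PySem.List.dedup l := by
    rw [hd, PySem.Dict.keys_foldl_insert]
    simp [PySem.Dict.keys_empty, PySem.Set.update_nil_left]
  have hnd : d.keys.Nodup := by rw [hkeys]; exact PySem.List.nodup_dedup l
  rw [PySem.Dict.items_eq_map_keys d hnd dflt, hkeys]
  refine List.map_congr_left (fun k hk => ?_)
  have hkl : k ∈ l := (PySem.List.mem_dedup _ _).mp hk
  rw [hd, bcm_getD_foldl_insert, if_pos hkl]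

-- the inclusive class list looked up at lower k, for k ∈ concepts
theorem bcm_incl_getD (concepts : List String) (k : String) (hk : k ∈ concepts) :
    (bcmIncl concepts).getD (PySem.Str.lower k) [] =
      concepts.filter (fun c =>
        PySem.Str.isIn (PySem.Str.lower c) (PySem.Str.lower k) ||
        PySem.Str.isIn (PySem.Str.lower k) (PySem.Str.lower c)) := by
  unfold bcmIncl
  rw [bcm_getD_foldl_insert, if_pos]
  exact (PySem.List.mem_dedup _ _).mpr (List.mem_map_of_mem hk)

-- ===== VERDICT (by name: the statement is the Claim_ definition above) =====
theorem build_concept_map_spec : Claim_equal_build_concept_map := by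
  intro concepts _
  unfold Spec_build_concept_map build_concept_map build_concept_map_alt
  rw [bcm_items_foldl_insert _ ([] : List String), bcm_items_foldl_insert _ ([] : List String),
    PySem.List.dedup_eq_ofList (PySem.List.dedup concepts),
    PySem.Set.ofList_eq_self_of_nodup _ (PySem.List.nodup_dedup concepts)]
  refine List.map_congr_left (fun k hk => ?_)
  have hkl : k ∈ concepts := (PySem.List.mem_dedup _ _).mp hk
  rw [bcm_incl_getD concepts k hkl, List.filter_filter]
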